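-- pv_equiv track=rewrite | github.com/hoanthiennguyen/darknet | object_to_string.py | normalize_all_factor
-- ===== SOURCE A (Python) =====
-- def normalize_all_factor(polynomial: str) -> str:
--     factor = ""
--     poly = ""
--     index = 0
--     lengh = len(polynomial)
--     while True:
--         if index > lengh:
--             break
--         current_char = polynomial[index] if index < lengh else ""
--         index += 1
--         if current_char.isdigit() or is_comma(current_char):
--             if factor:
--                 factor += current_char
--             else:
--                 factor = current_char
--         else:
--             if factor:
--                 factor = factor.lstrip('0')
--                 if factor == '' or is_comma(factor[0]):
--                     factor = f'0{factor}'
--                 poly += f'{factor}{current_char}'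
--                 factor = ""
--             else:
--                 poly += current_char
--
--     return poly
--
-- def is_comma(token: str) -> bool:
--     return token in [",", "."]
-- ===== SOURCE B (Python) =====
-- def is_comma(token: str) -> bool:
--     return token in [",", "."]
--
--
-- def _is_factor_char(c: str) -> bool:
--     return c.isdigit() or is_comma(c)
--
--
-- def normalize_all_factor(polynomial: str) -> str:
--     # Run-at-a-time decomposition: split the string into maximal runs of
--     # factor characters (digits/commas) vs. other characters, normalize
--     # each factor run, and concatenate.
--     pieces = []
--     i, n = 0, len(polynomial)
--     while i < n:
--         k = _is_factor_char(polynomial[i])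
--         j = i + 1
--         while j < n and _is_factor_char(polynomial[j]) == k:
--             j += 1
--         run = polynomial[i:j]
--         if k:
--             run = run.lstrip('0')
--             if run == '' or is_comma(run[0]):
--                 run = '0' + run
--         pieces.append(run)
--         i = j
--     return ''.join(pieces)
-- ===== Notes on version B (the rewrite author's own statement) =====
-- stated objective: simpler
-- what changed: Replaced A's per-character state machine (pending-factor accumulator, flush-on-non-factor-char, plus a sentinel empty character past the end to flush the last factor) with a run-at-a-time decomposition: the string is split into maximal runs of factor characters (digits/commas) vs. other characters, each factor run is normalized by stripping leading zeros with the comma/empty rule, and the pieces are joined.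
import Mathlib
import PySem

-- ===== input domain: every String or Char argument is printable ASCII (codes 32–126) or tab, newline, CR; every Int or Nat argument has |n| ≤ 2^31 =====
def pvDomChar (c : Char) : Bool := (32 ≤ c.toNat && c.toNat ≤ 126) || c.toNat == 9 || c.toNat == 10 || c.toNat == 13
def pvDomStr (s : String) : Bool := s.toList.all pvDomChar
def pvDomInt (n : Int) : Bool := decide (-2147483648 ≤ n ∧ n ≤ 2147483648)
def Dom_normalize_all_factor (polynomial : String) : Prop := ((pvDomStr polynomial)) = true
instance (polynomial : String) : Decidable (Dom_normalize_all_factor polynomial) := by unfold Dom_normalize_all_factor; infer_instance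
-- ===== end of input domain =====

-- B replaces A's per-character state machine (pending-factor accumulator + flush flag)
-- with a run-at-a-time decomposition: split into maximal factor/non-factor runs and
-- normalize each factor run; objective: simpler.


-- is_comma(token) for a single character (the call sites only ever pass 1-char
-- strings or ""; the "" case is handled where it arises, in pvLoopA's [] case)
def pvIsComma (c : Char) : Bool := c == ',' || c == '.'

-- current_char.isdigit() or is_comma(current_char), for a 1-char string
def pvKey (c : Char) : Bool := PySem.Chars.isdigit c || pvIsComma c

-- the normalization text both Pythons contain verbatim:
-- f = factor.lstrip('0'); if f == '' or is_comma(f[0]): f = '0' + f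
def pvNormalize (run : List Char) : List Char :=
  match run.dropWhile (· == '0') with
  | [] => ['0']
  | d :: ds => if pvIsComma d then '0' :: d :: ds else d :: ds

-- ===== PORT A =====
-- A's while-loop over indices 0..lengh with state (factor, poly): the [] case is the
-- last iteration, current_char = "" ("" is neither digit nor comma, so it only
-- flushes a pending factor and appends the empty current_char).
def pvLoopA : List Char → List Char → List Char → List Char
  | [], factor, poly =>
      if factor ≠ [] then poly ++ pvNormalize factor else poly
  | c :: cs, factor, poly =>
      if pvKey c then pvLoopA cs (factor ++ [c]) poly
      else if factor ≠ [] then pvLoopA cs [] (poly ++ pvNormalize factor ++ [c])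
      else pvLoopA cs factor (poly ++ [c])

def normalize_all_factor (polynomial : String) : String :=
  String.ofList (pvLoopA polynomial.toList [] [])

-- ===== PORT B =====
-- B's outer while loop: peel one maximal run of equal key (the inner j-scan is
-- takeWhile/dropWhile), normalize the run if it is a factor run, recurse on the rest.
def pvRunsB : List Char → List Char
  | [] => []
  | c :: cs =>
      (if pvKey c then pvNormalize (c :: cs.takeWhile (fun d => pvKey d == pvKey c))
       else c :: cs.takeWhile (fun d => pvKey d == pvKey c))
      ++ pvRunsB (cs.dropWhile (fun d => pvKey d == pvKey c))
termination_by l => l.length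
decreasing_by
  have := List.length_dropWhile_le (fun d => pvKey d == pvKey c) cs
  simpa using Nat.lt_succ_of_le this

def normalize_all_factor_alt (polynomial : String) : String :=
  String.ofList (pvRunsB polynomial.toList)

-- ===== PRECONDITION & SPEC =====
def Spec_normalize_all_factor (polynomial : String) (out : String) : Prop := out = normalize_all_factor_alt polynomial
instance (polynomial : String) (out : String) : Decidable (Spec_normalize_all_factor polynomial out) := by unfold Spec_normalize_all_factor; infer_instance

-- ===== CLAIM (what is proved, stated in full; the proofs are below) =====
def Claim_equal_normalize_all_factor : Prop := ∀ (polynomial : String), Dom_normalize_all_factor polynomial → Spec_normalize_all_factor polynomial (normalize_all_factor polynomial)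

-- ===== LEMMAS AND PROOFS =====

-- a leading non-factor character is its own piece: the false-run peels one char at a time
theorem pvRunsB_cons_false {c : Char} (cs : List Char) (hc : pvKey c = false) :
    pvRunsB (c :: cs) = c :: pvRunsB cs := by
  cases cs with
  | nil => simp [pvRunsB, hc]
  | cons d ds =>
    by_cases hd : pvKey d = true
    · conv_lhs => simp only [pvRunsB]
      simp [hc, hd]
    · simp only [Bool.not_eq_true] at hd
      conv_lhs => simp only [pvRunsB]
      conv_rhs => simp only [pvRunsB]
      simp [hc, hd]

-- a maximal all-key run followed by a non-key char splits off as one normalized piece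
theorem pvRunsB_factor_append {f : Char} (fs cs : List Char) (c : Char)
    (hf : pvKey f = true) (hfs : ∀ x ∈ fs, pvKey x = true) (hc : pvKey c = false) :
    pvRunsB (f :: (fs ++ c :: cs)) = pvNormalize (f :: fs) ++ pvRunsB (c :: cs) := by
  have hall : ∀ x ∈ fs, (fun d => pvKey d == pvKey f) x = true := by
    intro x hx; simp [hfs x hx, hf]
  have ht1 : fs.takeWhile (fun d => pvKey d == pvKey f) = fs :=
    List.takeWhile_eq_self_iff.mpr hall
  have hd1 : fs.dropWhile (fun d => pvKey d == pvKey f) = [] :=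
    List.dropWhile_eq_nil_iff.mpr hall
  have ht : (fs ++ c :: cs).takeWhile (fun d => pvKey d == pvKey f) = fs := by
    rw [List.takeWhile_append, if_pos (by rw [ht1])]
    simp [hc, hf]
  have hdr : (fs ++ c :: cs).dropWhile (fun d => pvKey d == pvKey f) = c :: cs := by
    rw [List.dropWhile_append, if_pos (by simp [hd1])]
    simp [hc, hf]
  conv_lhs => simp only [pvRunsB]
  rw [ht, hdr, if_pos hf]

-- loop invariant: A's loop from state (factor, poly), with factor a run of key-chars,
-- computes poly ++ B's run decomposition of factor ++ rest
theorem pvLoopA_eq (rest : List Char) :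
    ∀ (factor poly : List Char), (∀ x ∈ factor, pvKey x = true) →
      pvLoopA rest factor poly = poly ++ pvRunsB (factor ++ rest) := by
  induction rest with
  | nil =>
    intro factor poly hfac
    cases factor with
    | nil => simp [pvLoopA, pvRunsB]
    | cons f fs =>
      have hf : pvKey f = true := hfac f (by simp)
      have hall : ∀ x ∈ fs, (fun d => pvKey d == pvKey f) x = true := by
        intro x hx; simp [hfac x (by simp [hx]), hf]
      have ht1 : fs.takeWhile (fun d => pvKey d == pvKey f) = fs :=
        List.takeWhile_eq_self_iff.mpr hall
      have hd1 : fs.dropWhile (fun d => pvKey d == pvKey f) = [] :=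
        List.dropWhile_eq_nil_iff.mpr hall
      rw [List.append_nil]
      conv_rhs => simp only [pvRunsB]
      rw [ht1, hd1, if_pos hf]
      simp [pvLoopA, pvRunsB]
  | cons c cs ih =>
    intro factor poly hfac
    by_cases hk : pvKey c = true
    · rw [pvLoopA]
      simp only [hk, if_true]
      rw [ih (factor ++ [c]) poly
        (by intro x hx; rcases List.mem_append.mp hx with h | h
            · exact hfac x h
            · simp at h; simpa [h] using hk)]
      simp
    · simp only [Bool.not_eq_true] at hk
      cases factor with
      | nil =>
        rw [pvLoopA]
        simp only [hk, Bool.false_eq_true, if_false, ne_eq, not_true_eq_false]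
        rw [ih [] (poly ++ [c]) (by simp)]
        simp only [List.nil_append]
        rw [pvRunsB_cons_false cs hk]
        simp
      | cons f fs =>
        have hf : pvKey f = true := hfac f (by simp)
        have hfs : ∀ x ∈ fs, pvKey x = true := fun x hx => hfac x (by simp [hx])
        rw [pvLoopA]
        simp only [hk, Bool.false_eq_true, if_false, ne_eq, reduceCtorEq,
          not_false_eq_true, if_true]
        rw [ih [] (poly ++ pvNormalize (f :: fs) ++ [c]) (by simp)]
        simp only [List.nil_append, List.cons_append]
        rw [pvRunsB_factor_append fs cs c hf hfs hk, pvRunsB_cons_false cs hk]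
        simp

-- ===== VERDICT (by name: the statement is the Claim_ definition above) =====
theorem normalize_all_factor_spec : Claim_equal_normalize_all_factor := by
  intro polynomial _
  unfold Spec_normalize_all_factor normalize_all_factor normalize_all_factor_alt
  rw [pvLoopA_eq polynomial.toList [] [] (by simp)]
  simp
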